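-- pv_equiv track=rewrite | github.com/opometun/openproject-mcp | src/openproject_mcp/transports/http/accept_middleware.py | _parse_accept
-- ===== SOURCE A (Python) =====
-- from typing import Callable, Tuple
--
-- def _parse_accept(header_value: str | None) -> Tuple[bool, bool]:
--     """
--     Return (has_json, has_sse) considering wildcards and q-values.
--     """
--     if not header_value or not header_value.strip():
--         return True, False  # missing -> treat as JSON acceptable
--
--     has_json = False
--     has_sse = False
--     for part in header_value.split(","):
--         media_range = part.strip()
--         if not media_range:
--             continue
--         # strip q
--         if ";" in media_range:
--             media_range = media_range.split(";", 1)[0].strip()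
--         if media_range in ("*", "*/*"):
--             has_json = True
--             has_sse = True
--             continue
--         if media_range in ("application/json", "application/*"):
--             has_json = True
--             continue
--         if media_range == "text/event-stream":
--             has_sse = True
--             continue
--     return has_json, has_sse
-- ===== SOURCE B (Python) =====
-- _TABLE = {
--     "*": (True, True),
--     "*/*": (True, True),
--     "application/json": (True, False),
--     "application/*": (True, False),
--     "text/event-stream": (False, True),
-- }
--
-- def _parse_accept(header_value):
--     # Character-level scanner: no split()/strip() passes.  Walks the header once,
--     # building each media range (whitespace-trimmed, parameters after ';' ignored)
--     # and OR-ing in its contribution from a lookup table at every comma.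
--     if not header_value or not header_value.strip():
--         return True, False
--     has_json = False
--     has_sse = False
--     buf = ""        # media range built so far for the current part
--     pending = ""    # run of inner whitespace, flushed only if more non-space follows
--     skipping = False  # True after ';' until the next ','
--     for ch in header_value + ",":
--         if ch == ",":
--             j, s = _TABLE.get(buf, (False, False))
--             has_json = has_json or j
--             has_sse = has_sse or s
--             buf = ""
--             pending = ""
--             skipping = False
--         elif skipping:
--             pass
--         elif ch == ";":
--             skipping = True
--         elif ch.isspace():
--             if buf:
--                 pending = pending + ch
--         else:
--             buf = buf + pending + ch
--             pending = ""
--     return has_json, has_sse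
-- ===== Notes on version B (the rewrite author's own statement) =====
-- stated objective: alternative
-- what changed: Replaces A's split/strip/split-again string-method pipeline with a single character-level scanner (an explicit state machine over buf/pending/skipping) that builds each trimmed media range in place and ORs in its contribution from a lookup table at every comma.
import Mathlib
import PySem

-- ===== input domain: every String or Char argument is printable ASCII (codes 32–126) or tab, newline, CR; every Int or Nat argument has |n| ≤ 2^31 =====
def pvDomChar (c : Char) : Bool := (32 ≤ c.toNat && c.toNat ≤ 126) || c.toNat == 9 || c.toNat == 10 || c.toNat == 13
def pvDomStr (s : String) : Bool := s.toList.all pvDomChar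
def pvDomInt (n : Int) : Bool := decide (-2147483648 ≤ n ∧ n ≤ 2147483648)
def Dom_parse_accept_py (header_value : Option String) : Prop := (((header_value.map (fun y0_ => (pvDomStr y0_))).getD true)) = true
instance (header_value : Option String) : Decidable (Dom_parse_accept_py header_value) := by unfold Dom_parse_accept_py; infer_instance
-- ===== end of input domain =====

-- B replaces A's split/strip/split-again string-method pipeline with a single character-level
-- scanner (state machine over buf/pending/skipping) that ORs in each media range's table entry
-- at every comma.

-- ===== PORT A =====
-- loop body of A's 'for part in header_value.split(",")'
def pvStepA (st : Bool × Bool) (part : String) : Bool × Bool :=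
  let m := PySem.Str.strip part
  if m = "" then st
  else
    let m2 := if PySem.Str.isIn ";" m then
        PySem.Str.strip (((PySem.Str.splitMax? m ";" 1).getD []).headD "")
      else m
    if m2 = "*" ∨ m2 = "*/*" then (true, true)
    else if m2 = "application/json" ∨ m2 = "application/*" then (true, st.2)
    else if m2 = "text/event-stream" then (st.1, true)
    else st

def parse_accept_py (header_value : Option String) : Bool × Bool :=
  match header_value with
  | none => (true, false)
  | some s =>
    if s = "" ∨ PySem.Str.strip s = "" then (true, false)
    else ((PySem.Str.split? s ",").getD []).foldl pvStepA (false, false)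

-- ===== PORT B =====
-- scanner state: (has_json, has_sse, buf, pending, skipping); buf/pending are the
-- strings of B represented as their character lists
structure pvSt where
  j : Bool
  s : Bool
  buf : List Char
  pending : List Char
  skipping : Bool
deriving Repr, DecidableEq

-- B's _TABLE (str keys represented as their character lists)
def pvTable : PySem.Dict (List Char) (Bool × Bool) :=
  PySem.Dict.ofList
    [("*".toList, (true, true)), ("*/*".toList, (true, true)),
     ("application/json".toList, (true, false)), ("application/*".toList, (true, false)),
     ("text/event-stream".toList, (false, true))]

-- loop body of B's 'for ch in header_value + ","'
def pvStepB (st : pvSt) (ch : Char) : pvSt :=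
  if ch = ',' then
    let p := pvTable.getD st.buf (false, false)
    ⟨st.j || p.1, st.s || p.2, [], [], false⟩
  else if st.skipping then st
  else if ch = ';' then { st with skipping := true }
  else if PySem.Chars.isspace ch then
    if st.buf = [] then st else { st with pending := st.pending ++ [ch] }
  else { st with buf := st.buf ++ st.pending ++ [ch], pending := [] }

def parse_accept_py_alt (header_value : Option String) : Bool × Bool :=
  match header_value with
  | none => (true, false)
  | some s =>
    if s = "" ∨ PySem.Str.strip s = "" then (true, false)
    else
      let fin := (s.toList ++ [',']).foldl pvStepB ⟨false, false, [], [], false⟩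
      (fin.j, fin.s)

-- ===== PRECONDITION & SPEC =====
def Spec_parse_accept_py (header_value : Option String) (out : Bool × Bool) : Prop := out = parse_accept_py_alt header_value
instance (header_value : Option String) (out : Bool × Bool) : Decidable (Spec_parse_accept_py header_value out) := by unfold Spec_parse_accept_py; infer_instance

-- ===== CLAIM (what is proved, stated in full; the proofs are below) =====
def Claim_equal_parse_accept_py : Prop := ∀ (header_value : Option String), Dom_parse_accept_py header_value → Spec_parse_accept_py header_value (parse_accept_py header_value)

-- ===== LEMMAS AND PROOFS =====

-- The normalized media range of a part, on the string level (A's computation).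
def pvNorm (part : String) : String :=
  let m := PySem.Str.strip part
  if m = "" then ""
  else if PySem.Str.isIn ";" m then
    PySem.Str.strip (((PySem.Str.splitMax? m ";" 1).getD []).headD "")
  else m

def pvJ : List String := ["*", "*/*", "application/json", "application/*"]
def pvS : List String := ["*", "*/*", "text/event-stream"]
def pvJc : List (List Char) := ["*".toList, "*/*".toList, "application/json".toList, "application/*".toList]
def pvSc : List (List Char) := ["*".toList, "*/*".toList, "text/event-stream".toList]

-- The normalized media range on the character level.
def pvNormC (p : List Char) : List Char := PySem.Chars.strip (p.takeWhile (· ≠ ';'))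

-- ---------- A-side characterization ----------
lemma stepA_eq (st : Bool × Bool) (part : String) :
    pvStepA st part = (st.1 || decide (pvNorm part ∈ pvJ), st.2 || decide (pvNorm part ∈ pvS)) := by
  unfold pvStepA pvNorm
  by_cases hm : PySem.Str.strip part = ""
  · simp [hm, pvJ, pvS]
  · simp only [hm, if_false]
    set m2 := if PySem.Str.isIn ";" (PySem.Str.strip part) then
        PySem.Str.strip (((PySem.Str.splitMax? (PySem.Str.strip part) ";" 1).getD []).headD "")
      else PySem.Str.strip part with hm2
    by_cases h1 : m2 = "*" ∨ m2 = "*/*"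
    · rcases h1 with h | h <;> rw [h] <;> simp [pvJ, pvS]
    · by_cases h2 : m2 = "application/json" ∨ m2 = "application/*"
      · have h1' : ¬(m2 = "*" ∨ m2 = "*/*") := h1
        rcases h2 with h | h <;> rw [h] at h1' ⊢ <;> simp [pvJ, pvS]
      · by_cases h3 : m2 = "text/event-stream"
        · have h1' : ¬(m2 = "*" ∨ m2 = "*/*") := h1
          have h2' : ¬(m2 = "application/json" ∨ m2 = "application/*") := h2
          rw [h3] at h1' h2' ⊢
          simp [pvJ, pvS]
        · rw [not_or] at h1 h2
          simp [pvJ, pvS, h1.1, h1.2, h2.1, h2.2, h3]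

lemma foldA_eq (parts : List String) (js ss : Bool) :
    parts.foldl pvStepA (js, ss)
    = (js || parts.any (fun p => decide (pvNorm p ∈ pvJ)),
       ss || parts.any (fun p => decide (pvNorm p ∈ pvS))) := by
  induction parts generalizing js ss with
  | nil => simp
  | cons p ps ih =>
    simp only [List.foldl_cons, stepA_eq, List.any_cons]
    rw [ih]
    simp [Bool.or_assoc]

-- ---------- generic whitespace/strip lemmas ----------
lemma dropWhile_head_false {p : Char → Bool} :
    ∀ (l r : List Char) (a : Char), List.dropWhile p l = a :: r → p a = false := by
  intro l
  induction l with
  | nil => intro r a h; simp at h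
  | cons c cl ih =>
    intro r a h
    by_cases hc : p c
    · rw [List.dropWhile_cons_of_pos hc] at h; exact ih _ _ h
    · rw [List.dropWhile_cons_of_neg hc] at h
      cases h
      simpa using hc

lemma takeWhile_append_all {p : Char → Bool} :
    ∀ (t y : List Char), (∀ c ∈ t, p c = true) → List.takeWhile p (t ++ y) = t ++ List.takeWhile p y := by
  intro t
  induction t with
  | nil => intro y _; simp
  | cons c cl ih =>
    intro y h
    rw [List.cons_append, List.takeWhile_cons_of_pos (h c (by simp)), ih y (fun d hd => h d (by simp [hd]))]
    simp

lemma takeWhile_all {p : Char → Bool} (l : List Char) (h : ∀ c ∈ l, p c = true) :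
    List.takeWhile p l = l := by
  have := takeWhile_append_all l [] h
  simpa using this

lemma mem_dropWhile_iff {p : Char → Bool} (l : List Char) (c : Char) (hc : p c = false) :
    c ∈ List.dropWhile p l ↔ c ∈ l := by
  constructor
  · exact fun h => (List.dropWhile_sublist p).subset h
  · intro h
    rw [← List.takeWhile_append_dropWhile (p := p) (l := l)] at h
    rcases List.mem_append.1 h with h1 | h1
    · have := List.mem_takeWhile_imp h1
      rw [hc] at this
      exact absurd this (by simp)
    · exact h1

lemma rstrip_eq_nil (u : List Char) (hu : ∀ c ∈ u, PySem.Chars.isspace c = true) :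
    PySem.Chars.rstrip u = [] := by
  have h : List.dropWhile PySem.Chars.isspace u.reverse = [] :=
    List.dropWhile_eq_nil_iff.2 (fun c hcn => hu c (List.mem_reverse.1 hcn))
  simp [PySem.Chars.rstrip, h]

lemma rstrip_append_cons (u y : List Char) (c : Char) (hc : PySem.Chars.isspace c = false) :
    PySem.Chars.rstrip (u ++ c :: y) = u ++ c :: PySem.Chars.rstrip y := by
  have hin : List.dropWhile PySem.Chars.isspace (y.reverse ++ [c])
      = List.dropWhile PySem.Chars.isspace y.reverse ++ [c] := by
    rw [List.dropWhile_append]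
    by_cases h : (List.dropWhile PySem.Chars.isspace y.reverse).isEmpty
    · rw [if_pos h]
      rw [List.isEmpty_iff] at h
      rw [h]
      simp [List.dropWhile_cons, hc]
    · rw [if_neg h]
  simp only [PySem.Chars.rstrip, List.reverse_append, List.reverse_cons]
  rw [List.dropWhile_append, hin]
  simp

lemma lstrip_append_of_space (u y : List Char) (hu : ∀ c ∈ u, PySem.Chars.isspace c = true) :
    PySem.Chars.lstrip (u ++ y) = PySem.Chars.lstrip y := by
  have h : List.dropWhile PySem.Chars.isspace u = [] := List.dropWhile_eq_nil_iff.2 hu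
  simp [PySem.Chars.lstrip, List.dropWhile_append, h]

lemma strip_eq_nil_iff (u : List Char) :
    PySem.Chars.strip u = [] ↔ ∀ c ∈ u, PySem.Chars.isspace c = true := by
  constructor
  · intro h c hc
    rw [← List.takeWhile_append_dropWhile (p := PySem.Chars.isspace) (l := u)] at hc
    rcases List.mem_append.1 hc with h1 | h1
    · exact List.mem_takeWhile_imp h1
    · have h2 : List.dropWhile PySem.Chars.isspace (List.dropWhile PySem.Chars.isspace u).reverse = [] := by
        simpa [PySem.Chars.strip, PySem.Chars.rstrip, PySem.Chars.lstrip] using h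
      exact List.dropWhile_eq_nil_iff.1 h2 c (List.mem_reverse.2 h1)
  · intro h
    have h1 : List.dropWhile PySem.Chars.isspace u = [] := List.dropWhile_eq_nil_iff.2 h
    simp [PySem.Chars.strip, PySem.Chars.lstrip, PySem.Chars.rstrip, h1]

lemma mem_strip_iff (u : List Char) (c : Char) (hc : PySem.Chars.isspace c = false) :
    c ∈ PySem.Chars.strip u ↔ c ∈ u := by
  simp only [PySem.Chars.strip, PySem.Chars.rstrip, PySem.Chars.lstrip]
  rw [List.mem_reverse, mem_dropWhile_iff _ _ hc, List.mem_reverse, mem_dropWhile_iff _ _ hc]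

-- ---------- first piece of split(";", 1) ----------
lemma goMax_nil (f m : Nat) (cur : List Char) (acc : List (List Char)) :
    PySem.Chars.splitOnMax.go [';'] (f+1) m [] cur acc = (cur.reverse :: acc).reverse := by
  rw [PySem.Chars.splitOnMax.go] <;> simp

lemma goMax_cons (f m : Nat) (c : Char) (r cur : List Char) (acc : List (List Char)) :
    PySem.Chars.splitOnMax.go [';'] (f+1) m (c::r) cur acc =
      if m = 0 then ((cur.reverse ++ (c::r)) :: acc).reverse
      else if (';' == c) = true then PySem.Chars.splitOnMax.go [';'] f (m-1) r [] (cur.reverse :: acc)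
      else PySem.Chars.splitOnMax.go [';'] f m r (c::cur) acc := by
  rw [PySem.Chars.splitOnMax.go] <;> simp [List.isPrefixOf]

lemma go1 (cs : List Char) : ∀ (fuel : Nat) (cur : List Char), cs.length < fuel →
    PySem.Chars.splitOnMax.go [';'] fuel 1 cs cur [] =
      if ';' ∈ cs then [cur.reverse ++ cs.takeWhile (· ≠ ';'), (cs.dropWhile (· ≠ ';')).drop 1]
      else [cur.reverse ++ cs] := by
  induction cs with
  | nil =>
    intro fuel cur h
    obtain ⟨f, rfl⟩ : ∃ f, fuel = f + 1 := ⟨fuel - 1, by omega⟩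
    rw [goMax_nil]
    simp
  | cons c r ih =>
    intro fuel cur h
    obtain ⟨f, rfl⟩ : ∃ f, fuel = f + 1 := ⟨fuel - 1, by omega⟩
    rw [goMax_cons, if_neg (by omega)]
    by_cases hc : c = ';'
    · subst hc
      rw [if_pos (by simp)]
      have hf : 0 < f := by simp at h; omega
      obtain ⟨f', rfl⟩ : ∃ f', f = f' + 1 := ⟨f - 1, by omega⟩
      have hz : PySem.Chars.splitOnMax.go [';'] (f'+1) 0 r [] [cur.reverse] = [cur.reverse, r] := by
        cases r with
        | nil => rw [goMax_nil]; simp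
        | cons a r' => rw [goMax_cons, if_pos rfl]; simp
      rw [hz]
      simp [List.takeWhile_cons_of_neg, List.dropWhile_cons_of_neg]
    · rw [if_neg (by simp [Ne.symm hc]), ih f (c::cur) (by simp at h ⊢; omega)]
      have htw : (c::r).takeWhile (· ≠ ';') = c :: r.takeWhile (· ≠ ';') :=
        List.takeWhile_cons_of_pos (by simp [hc])
      have hdw : (c::r).dropWhile (· ≠ ';') = r.dropWhile (· ≠ ';') :=
        List.dropWhile_cons_of_pos (by simp [hc])
      by_cases hm : ';' ∈ r <;> simp [hm, hc, Ne.symm hc, htw, hdw]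

-- ---------- strip/takeWhile commute ----------
lemma strip_takeWhile_strip (u : List Char) (h : ';' ∈ PySem.Chars.strip u) :
    PySem.Chars.strip ((PySem.Chars.strip u).takeWhile (· ≠ ';'))
      = PySem.Chars.strip (u.takeWhile (· ≠ ';')) := by
  have hw : ∀ c ∈ List.takeWhile PySem.Chars.isspace u, PySem.Chars.isspace c = true :=
    fun c hc => List.mem_takeWhile_imp hc
  have hsu : PySem.Chars.strip u = PySem.Chars.rstrip (List.dropWhile PySem.Chars.isspace u) := rfl
  have hsx : ';' ∈ PySem.Chars.rstrip (List.dropWhile PySem.Chars.isspace u) := hsu ▸ h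
  have hxmem : ';' ∈ List.dropWhile PySem.Chars.isspace u := by
    simp only [PySem.Chars.rstrip, List.mem_reverse] at hsx
    exact List.mem_reverse.1 ((List.dropWhile_sublist _).subset hsx)
  have hxd : List.dropWhile PySem.Chars.isspace u
      = (List.dropWhile PySem.Chars.isspace u).takeWhile (· ≠ ';')
        ++ (List.dropWhile PySem.Chars.isspace u).dropWhile (· ≠ ';') :=
    (List.takeWhile_append_dropWhile (p := (· ≠ ';')) (l := List.dropWhile PySem.Chars.isspace u)).symm
  obtain ⟨d', hd'⟩ : ∃ d', (List.dropWhile PySem.Chars.isspace u).dropWhile (· ≠ ';') = ';' :: d' := by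
    cases hdc : (List.dropWhile PySem.Chars.isspace u).dropWhile (· ≠ ';') with
    | nil =>
      rw [hdc, List.append_nil] at hxd
      have := List.mem_takeWhile_imp (hxd ▸ hxmem)
      simp at this
    | cons a d' =>
      have ha2 := dropWhile_head_false _ d' a hdc
      have ha3 : a = ';' := by simpa using ha2
      exact ⟨d', by rw [ha3]⟩
  have hr : PySem.Chars.rstrip (List.dropWhile PySem.Chars.isspace u)
      = (List.dropWhile PySem.Chars.isspace u).takeWhile (· ≠ ';') ++ ';' :: PySem.Chars.rstrip d' := by
    conv_lhs => rw [hxd, hd']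
    exact rstrip_append_cons _ d' ';' (by decide)
  have h1 : (PySem.Chars.rstrip (List.dropWhile PySem.Chars.isspace u)).takeWhile (· ≠ ';')
      = (List.dropWhile PySem.Chars.isspace u).takeWhile (· ≠ ';') := by
    rw [hr, takeWhile_append_all _ _ (fun c hc => List.mem_takeWhile_imp hc),
      List.takeWhile_cons_of_neg (by simp)]
    simp
  have h3 : u.takeWhile (· ≠ ';')
      = List.takeWhile PySem.Chars.isspace u
        ++ (List.dropWhile PySem.Chars.isspace u).takeWhile (· ≠ ';') := by
    conv_lhs => rw [← List.takeWhile_append_dropWhile (p := PySem.Chars.isspace) (l := u)]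
    rw [takeWhile_append_all _ _ (fun c hc => by
      have hs := hw c hc
      have hne : c ≠ ';' := fun he => by rw [he] at hs; exact absurd hs (by decide)
      simpa using hne)]
  have h4 : ∀ z, PySem.Chars.strip (List.takeWhile PySem.Chars.isspace u ++ z)
      = PySem.Chars.strip z := fun z => by
    simp [PySem.Chars.strip, lstrip_append_of_space _ z hw]
  rw [hsu, h1, h3, h4]

-- ---------- A's norm = char-level norm ----------
lemma headD_toList (l : List String) :
    (l.headD "").toList = (l.map String.toList).headD [] := by
  cases l <;> simp

lemma pvNorm_toList (st : String) :
    (pvNorm st).toList = pvNormC st.toList := by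
  unfold pvNorm pvNormC
  by_cases hq : PySem.Str.strip st = ""
  · rw [if_pos hq]
    have hq0 : PySem.Chars.strip st.toList = [] := by
      rw [← PySem.Str.toList_strip, hq]
      rfl
    have h2 : PySem.Chars.strip (st.toList.takeWhile (· ≠ ';')) = [] := by
      apply (strip_eq_nil_iff _).2
      intro c hcmem
      exact (strip_eq_nil_iff _).1 hq0 c ((List.takeWhile_sublist _).subset hcmem)
    rw [h2]
    rfl
  · rw [if_neg hq]
    by_cases hsemi : PySem.Str.isIn ";" (PySem.Str.strip st) = true
    · rw [if_pos hsemi]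
      have hsm : ';' ∈ PySem.Chars.strip st.toList := by
        rw [PySem.Str.isIn_iff_infix, PySem.Str.toList_strip] at hsemi
        exact hsemi.subset (by simp [show (";" : String).toList = [';'] from rfl])
      -- compute the split
      set q := PySem.Chars.strip st.toList with hqdef
      have hchars : PySem.Chars.splitMax? (PySem.Str.strip st).toList (";" : String).toList 1
          = some [q.takeWhile (· ≠ ';'), (q.dropWhile (· ≠ ';')).drop 1] := by
        rw [PySem.Str.toList_strip]
        show PySem.Chars.splitMax? q [';'] 1 = _
        rw [PySem.Chars.splitMax?]
        rw [if_neg (by simp)]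
        rw [PySem.Chars.splitOnMax]
        rw [if_neg (by omega)]
        have := go1 q (q.length + 1) [] (by omega)
        simp only [Int.toNat_one] at *
        rw [this, if_pos hsm]
        simp
      have hmap := PySem.Str.splitMax?_map (PySem.Str.strip st) ";" 1
      rw [hchars] at hmap
      cases hspl : PySem.Str.splitMax? (PySem.Str.strip st) ";" 1 with
      | none => rw [hspl] at hmap; simp at hmap
      | some l =>
        rw [hspl] at hmap
        simp only [Option.map_some] at hmap
        have hl : l.map String.toList = [q.takeWhile (· ≠ ';'), (q.dropWhile (· ≠ ';')).drop 1] := by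
          simpa using hmap
        simp only [Option.getD_some]
        rw [PySem.Str.toList_strip, headD_toList, hl]
        simp only [List.headD_cons]
        exact strip_takeWhile_strip st.toList hsm
    · rw [if_neg hsemi]
      have hnot : ';' ∉ PySem.Chars.strip st.toList := by
        intro hmem
        apply hsemi
        rw [PySem.Str.isIn_iff_infix, PySem.Str.toList_strip]
        obtain ⟨l1, l2, hq⟩ := List.append_of_mem hmem
        exact ⟨l1, l2, by rw [hq]; simp [show (";" : String).toList = [';'] from rfl]⟩
      have hnot' : ';' ∉ st.toList := fun h => hnot ((mem_strip_iff _ _ (by decide)).2 h)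
      have htw : st.toList.takeWhile (· ≠ ';') = st.toList :=
        takeWhile_all _ (fun c hcm => decide_eq_true (fun h => hnot' (h ▸ hcm)))
      rw [htw, PySem.Str.toList_strip]

-- ---------- structural comma split ----------
def pvSplitC : List Char → List (List Char)
  | [] => [[]]
  | c :: r =>
    match pvSplitC r with
    | [] => [[c]]      -- unreachable: pvSplitC never returns []
    | h :: t => if c = ',' then [] :: h :: t else (c :: h) :: t

lemma pvSplitC_ne_nil (cs : List Char) : pvSplitC cs ≠ [] := by
  cases cs with
  | nil => simp [pvSplitC]
  | cons c r =>
    simp only [pvSplitC]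
    cases h : pvSplitC r with
    | nil => simp
    | cons hh tt => split_ifs <;> simp

lemma go_nil (f : Nat) (cur : List Char) (acc : List (List Char)) :
    PySem.Chars.splitOn.go [','] (f+1) [] cur acc = (cur.reverse :: acc).reverse := by
  rw [PySem.Chars.splitOn.go] <;> simp

lemma go_cons (f : Nat) (c : Char) (r cur : List Char) (acc : List (List Char)) :
    PySem.Chars.splitOn.go [','] (f+1) (c::r) cur acc =
      if (',' == c) = true then PySem.Chars.splitOn.go [','] f r [] (cur.reverse :: acc)
      else PySem.Chars.splitOn.go [','] f r (c::cur) acc := by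
  rw [PySem.Chars.splitOn.go] <;> simp [List.isPrefixOf]

lemma goC (cs : List Char) : ∀ (fuel : Nat) (cur : List Char) (acc : List (List Char)),
    cs.length < fuel →
    PySem.Chars.splitOn.go [','] fuel cs cur acc
      = acc.reverse ++ ((pvSplitC cs).modifyHead (cur.reverse ++ ·)) := by
  induction cs with
  | nil =>
    intro fuel cur acc h
    obtain ⟨f, rfl⟩ : ∃ f, fuel = f + 1 := ⟨fuel - 1, by omega⟩
    rw [go_nil]
    simp [pvSplitC]
  | cons c r ih =>
    intro fuel cur acc h
    obtain ⟨f, rfl⟩ : ∃ f, fuel = f + 1 := ⟨fuel - 1, by omega⟩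
    rw [go_cons]
    cases hr : pvSplitC r with
    | nil => exact absurd hr (pvSplitC_ne_nil r)
    | cons hh tt =>
      by_cases hc : c = ','
      · rw [if_pos (by simp [hc]), ih f [] (cur.reverse :: acc) (by simp at h ⊢; omega)]
        subst hc
        simp [pvSplitC, hr]
      · rw [if_neg (by simp [Ne.symm hc]), ih f (c::cur) acc (by simp at h ⊢; omega)]
        simp [pvSplitC, hr, hc]

lemma splitOn_eq_pvSplitC (cs : List Char) :
    PySem.Chars.splitOn cs [','] = pvSplitC cs := by
  show PySem.Chars.splitOn.go [','] (cs.length + 1) cs [] [] = _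
  rw [goC cs (cs.length + 1) [] [] (by omega)]
  cases hr : pvSplitC cs with
  | nil => exact absurd hr (pvSplitC_ne_nil cs)
  | cons hh tt => simp

lemma pvSplitC_no_comma (cs : List Char) : ∀ p ∈ pvSplitC cs, ',' ∉ p := by
  induction cs with
  | nil => intro p hp; simp [pvSplitC] at hp; simp [hp]
  | cons c r ih =>
    intro p hp
    cases hr : pvSplitC r with
    | nil => exact absurd hr (pvSplitC_ne_nil r)
    | cons hh tt =>
      rw [hr] at ih
      simp only [pvSplitC, hr] at hp
      by_cases hc : c = ','
      · rw [if_pos hc] at hp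
        rcases List.mem_cons.1 hp with rfl | hp2
        · simp
        · exact ih p hp2
      · rw [if_neg hc] at hp
        rcases List.mem_cons.1 hp with rfl | hp2
        · intro hmem
          rcases List.mem_cons.1 hmem with h1 | h1
          · exact hc h1.symm
          · exact ih hh (by simp) h1
        · exact ih p (by simp [hp2])

lemma pvSplitC_flat (cs : List Char) :
    (pvSplitC cs).flatMap (· ++ [',']) = cs ++ [','] := by
  induction cs with
  | nil => simp [pvSplitC]
  | cons c r ih =>
    cases hr : pvSplitC r with
    | nil => exact absurd hr (pvSplitC_ne_nil r)
    | cons hh tt =>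
      rw [hr] at ih
      by_cases hc : c = ','
      · subst hc
        simp only [pvSplitC, hr, if_pos rfl, List.flatMap_cons]
        simp only [List.flatMap_cons] at ih
        simp [ih]
      · simp only [pvSplitC, hr, if_neg hc, List.flatMap_cons]
        simp only [List.flatMap_cons] at ih
        simp [← ih]

-- ---------- the table lookup is the two membership tests ----------
lemma table_getD (tok : List Char) :
    pvTable.getD tok (false, false) = (decide (tok ∈ pvJc), decide (tok ∈ pvSc)) := by
  by_cases h1 : tok = ['*']
  · subst h1; decide
  by_cases h2 : tok = ['*', '/', '*']
  · subst h2; decide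
  by_cases h3 : tok = ['a', 'p', 'p', 'l', 'i', 'c', 'a', 't', 'i', 'o', 'n', '/', 'j', 's', 'o', 'n']
  · subst h3; decide
  by_cases h4 : tok = ['a', 'p', 'p', 'l', 'i', 'c', 'a', 't', 'i', 'o', 'n', '/', '*']
  · subst h4; decide
  by_cases h5 : tok = ['t', 'e', 'x', 't', '/', 'e', 'v', 'e', 'n', 't', '-', 's', 't', 'r', 'e', 'a', 'm']
  · subst h5; decide
  have hmem : ((decide (tok ∈ pvJc)), (decide (tok ∈ pvSc))) = ((false : Bool), (false : Bool)) := by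
    simp [pvJc, pvSc, h1, h2, h3, h4, h5]
  rw [hmem]
  rw [PySem.Dict.getD_eq_get?_getD]
  have hmk : pvTable = PySem.Dict.mk
      [("*".toList, (true, true)), ("*/*".toList, (true, true)),
       ("application/json".toList, (true, false)), ("application/*".toList, (true, false)),
       ("text/event-stream".toList, (false, true))] := by rfl
  rw [hmk]
  simp only [PySem.Dict.get?_mk_cons]
  rw [if_neg (by simp; exact fun h => h1 h.symm), if_neg (by simp; exact fun h => h2 h.symm),
      if_neg (by simp; exact fun h => h3 h.symm), if_neg (by simp; exact fun h => h4 h.symm),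
      if_neg (by simp; exact fun h => h5 h.symm)]
  rfl

-- ---------- B-side scanner characterization ----------
-- what the scanner's buf holds after consuming a comma-free part
def pvAbsorb : List Char → List Char → List Char → List Char
  | buf, _, [] => buf
  | buf, pending, c :: r =>
    if c = ';' then buf
    else if PySem.Chars.isspace c then
      if buf = [] then pvAbsorb buf pending r else pvAbsorb buf (pending ++ [c]) r
    else pvAbsorb (buf ++ pending ++ [c]) [] r

lemma pvAbsorb_spec (p : List Char) : ∀ (buf pending : List Char),
    (buf = [] → pending = []) → (∀ c ∈ pending, PySem.Chars.isspace c = true) →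
    pvAbsorb buf pending p =
      if buf = [] then pvNormC p
      else buf ++ PySem.Chars.rstrip (pending ++ p.takeWhile (· ≠ ';')) := by
  induction p with
  | nil =>
    intro buf pending hbp hpend
    by_cases hb : buf = []
    · simp [pvAbsorb, hb, pvNormC, PySem.Chars.strip, PySem.Chars.lstrip, rstrip_eq_nil]
    · simp [pvAbsorb, hb, rstrip_eq_nil pending hpend]
  | cons c r ih =>
    intro buf pending hbp hpend
    by_cases hc : c = ';'
    · subst hc
      have habs : pvAbsorb buf pending (';' :: r) = buf := by simp [pvAbsorb]
      have htw0 : List.takeWhile (· ≠ ';') ((';' : Char) :: r) = [] := by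
        simp [List.takeWhile_cons]
      rw [habs, htw0]
      by_cases hb : buf = []
      · rw [if_pos hb, hb]
        simp [pvNormC, htw0, PySem.Chars.strip, PySem.Chars.lstrip, PySem.Chars.rstrip]
      · rw [if_neg hb, List.append_nil, rstrip_eq_nil pending hpend, List.append_nil]
    · have htw : List.takeWhile (· ≠ ';') (c :: r) = c :: List.takeWhile (· ≠ ';') r := by
        simp [List.takeWhile_cons, hc]
      by_cases hs : PySem.Chars.isspace c = true
      · have habs : pvAbsorb buf pending (c :: r)
            = if buf = [] then pvAbsorb buf pending r else pvAbsorb buf (pending ++ [c]) r := by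
          simp [pvAbsorb, hc, hs]
        by_cases hb : buf = []
        · have hp0 : pending = [] := hbp hb
          rw [habs, if_pos hb, if_pos hb, ih buf pending hbp hpend, if_pos hb]
          have hstrip : PySem.Chars.strip (c :: List.takeWhile (· ≠ ';') r)
              = PySem.Chars.strip (List.takeWhile (· ≠ ';') r) := by
            simp only [PySem.Chars.strip, PySem.Chars.lstrip, List.dropWhile_cons]
            rw [if_pos hs]
          simp only [pvNormC, htw, hstrip]
        · rw [habs, if_neg hb, if_neg hb,
            ih buf (pending ++ [c]) (fun h => absurd h hb)
              (fun d hd => by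
                rcases List.mem_append.1 hd with h | h
                · exact hpend d h
                · simp at h; rw [h]; exact hs),
            if_neg hb, htw]
          simp
      · have hs' : PySem.Chars.isspace c = false := by simpa using hs
        have habs : pvAbsorb buf pending (c :: r) = pvAbsorb (buf ++ pending ++ [c]) [] r := by
          simp [pvAbsorb, hc, hs]
        rw [habs, ih (buf ++ pending ++ [c]) [] (by simp) (by simp),
          if_neg (by simp), htw]
        by_cases hb : buf = []
        · have hp0 : pending = [] := hbp hb
          rw [if_pos hb, hb, hp0]
          have h1 : PySem.Chars.strip (c :: List.takeWhile (· ≠ ';') r)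
              = c :: PySem.Chars.rstrip (List.takeWhile (· ≠ ';') r) := by
            have h2 : PySem.Chars.lstrip (c :: List.takeWhile (· ≠ ';') r)
                = c :: List.takeWhile (· ≠ ';') r := by
              simp [PySem.Chars.lstrip, List.dropWhile_cons, hs']
            show PySem.Chars.rstrip (PySem.Chars.lstrip _) = _
            rw [h2]
            have h5 := rstrip_append_cons [] (List.takeWhile (· ≠ ';') r) c hs'
            simpa using h5
          simp only [pvNormC, htw, h1]
          simp
        · rw [if_neg hb]
          have h5 := rstrip_append_cons pending (List.takeWhile (· ≠ ';') r) c hs'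
          rw [h5]
          simp

lemma scan_part (p : List Char) : ∀ (j s : Bool) (buf pending : List Char) (sk : Bool), ',' ∉ p →
    (p ++ [',']).foldl pvStepB ⟨j, s, buf, pending, sk⟩ =
      ⟨j || (pvTable.getD (if sk then buf else pvAbsorb buf pending p) (false, false)).1,
       s || (pvTable.getD (if sk then buf else pvAbsorb buf pending p) (false, false)).2,
       [], [], false⟩ := by
  induction p with
  | nil =>
    intro j s buf pending sk _
    cases sk <;> simp [pvStepB, pvAbsorb]
  | cons c r ih =>
    intro j s buf pending sk hp
    have hc : c ≠ ',' := fun h => hp (by simp [h])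
    have hr : ',' ∉ r := fun h => hp (by simp [h])
    rw [List.cons_append, List.foldl_cons]
    cases sk with
    | true =>
      rw [show pvStepB ⟨j, s, buf, pending, true⟩ c = ⟨j, s, buf, pending, true⟩ from by
        simp [pvStepB, hc]]
      rw [ih j s buf pending true hr]
      simp
    | false =>
      by_cases hsemi : c = ';'
      · subst hsemi
        rw [show pvStepB ⟨j, s, buf, pending, false⟩ ';' = ⟨j, s, buf, pending, true⟩ from by
          simp [pvStepB, hc]]
        rw [ih j s buf pending true hr]
        simp [pvAbsorb]
      · by_cases hs : PySem.Chars.isspace c = true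
        · by_cases hb : buf = []
          · rw [show pvStepB ⟨j, s, buf, pending, false⟩ c = ⟨j, s, buf, pending, false⟩ from by
              simp [pvStepB, hc, hsemi, hs, hb]]
            rw [ih j s buf pending false hr]
            simp [pvAbsorb, hsemi, hs, hb]
          · rw [show pvStepB ⟨j, s, buf, pending, false⟩ c = ⟨j, s, buf, pending ++ [c], false⟩ from by
              simp [pvStepB, hc, hsemi, hs, hb]]
            rw [ih j s buf (pending ++ [c]) false hr]
            simp [pvAbsorb, hsemi, hs, hb]
        · rw [show pvStepB ⟨j, s, buf, pending, false⟩ c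
              = ⟨j, s, buf ++ pending ++ [c], [], false⟩ from by
            simp [pvStepB, hc, hsemi, hs]]
          rw [ih j s (buf ++ pending ++ [c]) [] false hr]
          simp [pvAbsorb, hsemi, hs]

lemma scan_all (parts : List (List Char)) : ∀ (j s : Bool), (∀ p ∈ parts, ',' ∉ p) →
    (parts.flatMap (· ++ [','])).foldl pvStepB ⟨j, s, [], [], false⟩ =
      ⟨j || parts.any (fun p => decide (pvNormC p ∈ pvJc)),
       s || parts.any (fun p => decide (pvNormC p ∈ pvSc)), [], [], false⟩ := by
  induction parts with
  | nil => intro j s _; simp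
  | cons p ps ih =>
    intro j s hp
    rw [List.flatMap_cons, List.foldl_append]
    rw [scan_part p j s [] [] false (hp p (by simp))]
    rw [if_neg (by simp)]
    rw [pvAbsorb_spec p [] [] (fun _ => rfl) (by simp), if_pos rfl]
    rw [table_getD]
    rw [ih _ _ (fun q hq => hp q (by simp [hq]))]
    simp [Bool.or_assoc]

-- ---------- string/char membership bridge ----------
lemma norm_mem_J (st : String) :
    decide (pvNorm st ∈ pvJ) = decide (pvNormC st.toList ∈ pvJc) := by
  have key : ∀ t : String, pvNorm st = t ↔ pvNormC st.toList = t.toList := by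
    intro t
    constructor
    · intro h; rw [← pvNorm_toList, h]
    · intro h
      have h2 : (pvNorm st).toList = t.toList := by rw [pvNorm_toList]; exact h
      have h3 := congrArg String.ofList h2
      simpa using h3
  rw [decide_eq_decide]
  simp only [pvJ, pvJc, List.mem_cons, List.not_mem_nil, or_false, key]

lemma norm_mem_S (st : String) :
    decide (pvNorm st ∈ pvS) = decide (pvNormC st.toList ∈ pvSc) := by
  have key : ∀ t : String, pvNorm st = t ↔ pvNormC st.toList = t.toList := by
    intro t
    constructor
    · intro h; rw [← pvNorm_toList, h]
    · intro h
      have h2 : (pvNorm st).toList = t.toList := by rw [pvNorm_toList]; exact h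
      have h3 := congrArg String.ofList h2
      simpa using h3
  rw [decide_eq_decide]
  simp only [pvS, pvSc, List.mem_cons, List.not_mem_nil, or_false, key]

-- ===== VERDICT (by name: the statement is the Claim_ definition above) =====
theorem parse_accept_py_spec : Claim_equal_parse_accept_py := by
  intro hv _
  unfold Spec_parse_accept_py
  cases hv with
  | none => rfl
  | some s =>
    simp only [parse_accept_py, parse_accept_py_alt]
    split_ifs with h0
    · rfl
    · have hparts : (PySem.Str.split? s ",").getD []
          = (pvSplitC s.toList).map String.ofList := by
        simp [PySem.Str.split?, PySem.Chars.split?, splitOn_eq_pvSplitC]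
      have hflat : s.toList ++ [','] = (pvSplitC s.toList).flatMap (· ++ [',']) :=
        (pvSplitC_flat s.toList).symm
      rw [hparts, foldA_eq, hflat,
        scan_all (pvSplitC s.toList) false false (pvSplitC_no_comma s.toList)]
      simp only [List.any_map, Function.comp_def, norm_mem_J, norm_mem_S, Bool.false_or]
      simp
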